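-- pv_equiv track=rewrite | github.com/nohnoori/Algorithm_study | 7주/기능개발/ㄴㄹ/func_del.py | solution
-- ===== SOURCE A (Python) =====
-- def solution(progresses, speeds):
--     answer = []
--     idx=0
--     while idx<len(progresses):
--         cnt=0
--         for i in range(len(progresses)):
--             progresses[i]+=speeds[i]
--         if progresses[idx]>=100:
--             cnt+=1
--             idx+=1
--             for j in range(idx,len(progresses)):
--                 if progresses[j]>=100:
--                     cnt+=1
--                     idx+=1
--                 else:
--                     break
--             answer.append(cnt)
--     return answer
-- ===== SOURCE B (Python) =====
-- def solution(progresses, speeds):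
--     # days to finish each task = max(1, ceil((100-p)/s)); then group
--     # consecutive tasks whose day does not exceed the current group leader's day.
--     answer = []
--     cnt = 0
--     front = 0
--     for p, s in zip(progresses, speeds):
--         d = max(1, -((p - 100) // s))
--         if cnt and d <= front:
--             cnt += 1
--         else:
--             if cnt:
--                 answer.append(cnt)
--             cnt = 1
--             front = d
--     if cnt:
--         answer.append(cnt)
--     return answer
-- ===== Notes on version B (the rewrite author's own statement) =====
-- stated objective: alternative
-- what changed: B replaces A's day-by-day simulation (add speeds to every task each day until the front finishes) with a closed-form per-task completion day ceil((100-p)/s) (min 1) computed once, grouping consecutive tasks in a single pass; intended as faster (O(n) vs O(n*maxDays); a timing run could not measure a ratio because A timed out at n=16 where B returned), recorded label: none.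
-- outside the precondition, e.g. on solution([100], [0]): A returns [1], B raises ZeroDivisionError
import Mathlib
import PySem

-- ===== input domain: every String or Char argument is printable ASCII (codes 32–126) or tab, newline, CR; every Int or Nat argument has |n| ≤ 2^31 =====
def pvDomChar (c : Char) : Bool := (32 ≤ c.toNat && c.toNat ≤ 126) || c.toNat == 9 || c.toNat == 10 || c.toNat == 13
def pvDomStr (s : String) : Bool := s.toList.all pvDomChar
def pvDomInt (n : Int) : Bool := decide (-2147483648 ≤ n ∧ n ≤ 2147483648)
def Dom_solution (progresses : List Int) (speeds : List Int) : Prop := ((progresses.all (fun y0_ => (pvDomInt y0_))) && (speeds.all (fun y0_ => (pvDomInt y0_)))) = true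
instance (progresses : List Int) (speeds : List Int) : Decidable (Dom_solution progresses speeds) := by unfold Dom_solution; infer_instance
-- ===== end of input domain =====

-- B replaces A's day-by-day simulation with closed-form per-task completion days and one
-- grouping pass (intended as faster; a timing run measured no ratio: A timed out at n=16
-- where B returned). Note: Python A mutates `progresses` in place (adds speeds each simulated
-- day) while B does not; the equivalence proved here is about the RETURN value only.

-- ===== PORT A =====
-- one simulated day: `for i in range(len(progresses)): progresses[i] += speeds[i]`.
-- Exact whenever speeds is at least as long as progresses (guaranteed by Pre_solution);
-- on shorter speeds Python raises IndexError, which Pre_solution excludes.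
def pvStepDay (ps ss : List Int) : List Int := List.zipWith (· + ·) ps ss

-- inner sweep: `for j in range(idx, len): if progresses[j] >= 100: cnt += 1; idx += 1 else: break`
def pvSweep (ps : List Int) (j : Nat) (cnt : Int) : Int × Nat :=
  if h : j < ps.length then
    if 100 ≤ ps.getD j 0 then pvSweep ps (j + 1) (cnt + 1) else (cnt, j)
  else (cnt, j)
termination_by ps.length - j

-- the while loop; `fuel` is only a totality guard (Python's `while` has none): within
-- Pre_solution the supplied fuel is proved sufficient, so it never runs out.
def pvLoopA (ss : List Int) : Nat → List Int → Nat → List Int → List Int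
  | 0, _, _, ans => ans
  | fuel + 1, ps, idx, ans =>
    if idx < ps.length then
      let ps' := pvStepDay ps ss
      if 100 ≤ ps'.getD idx 0 then
        let r := pvSweep ps' (idx + 1) 1
        pvLoopA ss fuel ps' r.2 (ans ++ [r.1])
      else pvLoopA ss fuel ps' idx ans
    else ans

def pvFuel (ps : List Int) : Nat := (ps.map (fun p => (100 - p).toNat + 1)).sum + 1

def solution (progresses : List Int) (speeds : List Int) : List Int :=
  pvLoopA speeds (pvFuel progresses) progresses 0 []

-- ===== PORT B =====
-- days to finish one task: max(1, -((p - 100) // s)) = max(1, ceil((100-p)/s))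
def pvDay (x : Int × Int) : Int := max 1 (-(PySem.Int.floordiv (x.1 - 100) x.2))

-- state = (answer, cnt, front); one step of B's grouping loop
def pvStepB (st : List Int × Int × Int) (d : Int) : List Int × Int × Int :=
  if st.2.1 ≠ 0 ∧ d ≤ st.2.2 then (st.1, st.2.1 + 1, st.2.2)
  else ((if st.2.1 ≠ 0 then st.1 ++ [st.2.1] else st.1), 1, d)

-- trailing `if cnt: answer.append(cnt)`
def pvFinish (st : List Int × Int × Int) : List Int :=
  if st.2.1 ≠ 0 then st.1 ++ [st.2.1] else st.1

def solution_alt (progresses : List Int) (speeds : List Int) : List Int :=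
  pvFinish (((progresses.zip speeds).map pvDay).foldl pvStepB ([], 0, 0))

-- ===== PRECONDITION & SPEC =====
-- Pre_ restricts to the task's natural domain: speeds at least as long as progresses and
-- positive. Outside it Python A raises IndexError (shorter speeds), loops forever (a
-- nonpositive-speed unfinished task), or terminates only accidentally (nonpositive speed on
-- an already-finished task, where B's closed form would divide by zero).
def Pre_solution (progresses : List Int) (speeds : List Int) : Prop :=
  progresses.length ≤ speeds.length ∧ ∀ x ∈ progresses.zip speeds, 0 < x.2
instance (progresses : List Int) (speeds : List Int) : Decidable (Pre_solution progresses speeds) := by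
  unfold Pre_solution; infer_instance

def pvWitness_solution : List Int × List Int := ([93, 30, 55], [1, 30, 5])

def Spec_solution (progresses : List Int) (speeds : List Int) (out : List Int) : Prop := out = solution_alt progresses speeds
instance (progresses : List Int) (speeds : List Int) (out : List Int) : Decidable (Spec_solution progresses speeds out) := by unfold Spec_solution; infer_instance

-- ===== CLAIM (what is proved, stated in full; the proofs are below) =====
def Claim_equal_solution : Prop := ∀ (progresses : List Int) (speeds : List Int), Dom_solution progresses speeds → Pre_solution progresses speeds → Spec_solution progresses speeds (solution progresses speeds)

-- ===== LEMMAS AND PROOFS =====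

-- reference: grouping of the completion-day list
def pvGrp : List Int → List Int
  | [] => []
  | d :: rest =>
      ((1 : Int) + ((rest.takeWhile (fun x => decide (x ≤ d))).length : Int))
        :: pvGrp (rest.dropWhile (fun x => decide (x ≤ d)))
termination_by l => l.length
decreasing_by simp; exact List.length_dropWhile_le _ _

-- progress list after t simulated days
def pvPsAt (L : List (Int × Int)) (t : Nat) : List Int :=
  L.map (fun x => x.1 + (t : Int) * x.2)

theorem pvStepDay_psAt (L : List (Int × Int)) (rest : List Int) (t : Nat) :
    pvStepDay (pvPsAt L t) (L.map Prod.snd ++ rest) = pvPsAt L (t + 1) := by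
  induction L with
  | nil => simp [pvStepDay, pvPsAt]
  | cons x L ih =>
      simp [pvStepDay, pvPsAt] at ih ⊢
      constructor
      · ring
      · exact ih

theorem pvMapSndZipAppend (ps ss : List Int) (h : ps.length ≤ ss.length) :
    (ps.zip ss).map Prod.snd ++ ss.drop ps.length = ss := by
  induction ps generalizing ss with
  | nil => simp
  | cons p ps ih =>
      cases ss with
      | nil => simp at h
      | cons s ss => simpa using ih ss (by simpa using h)

theorem pvDay_le_iff (x : Int × Int) (hx : 0 < x.2) (c : Int) (hc : 1 ≤ c) :
    pvDay x ≤ c ↔ 100 ≤ x.1 + c * x.2 := by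
  unfold pvDay
  rw [max_le_iff]
  constructor
  · rintro ⟨-, h2⟩
    have := (PySem.Int.le_floordiv_iff_mul_le (a := x.1 - 100) (b := x.2) (q := -c) hx).mp (by omega)
    nlinarith
  · intro h
    refine ⟨hc, ?_⟩
    have : -c ≤ PySem.Int.floordiv (x.1 - 100) x.2 :=
      (PySem.Int.le_floordiv_iff_mul_le hx).mpr (by nlinarith)
    omega

theorem pvDay_pos (x : Int × Int) : 0 < pvDay x := lt_of_lt_of_le one_pos (le_max_left _ _)

theorem pvDay_bound (x : Int × Int) (hx : 0 < x.2) :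
    pvDay x ≤ ((100 - x.1).toNat : Int) + 1 := by
  unfold pvDay
  rw [max_le_iff]
  refine ⟨by omega, ?_⟩
  have h := (PySem.Int.le_floordiv_iff_mul_le
      (a := x.1 - 100) (b := x.2) (q := -(((100 - x.1).toNat : Int) + 1)) hx)
  have : -(((100 - x.1).toNat : Int) + 1) ≤ PySem.Int.floordiv (x.1 - 100) x.2 := by
    apply h.mpr
    by_cases hle : x.1 ≤ 100
    · have ht : ((100 - x.1).toNat : Int) = 100 - x.1 := by omega
      rw [ht]; nlinarith
    · have ht : ((100 - x.1).toNat : Int) = 0 := by omega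
      rw [ht]; nlinarith
  omega

theorem pvSweep_spec (ps : List Int) (j : Nat) (c : Int) :
    pvSweep ps j c =
      (c + (((ps.drop j).takeWhile (fun x => decide (100 ≤ x))).length : Int),
       j + ((ps.drop j).takeWhile (fun x => decide (100 ≤ x))).length) := by
  by_cases h : j < ps.length
  · rw [pvSweep]
    have hdrop : ps.drop j = ps[j] :: ps.drop (j + 1) := List.drop_eq_getElem_cons h
    have hget : ps.getD j 0 = ps[j] := List.getD_eq_getElem ps 0 h
    by_cases h100 : 100 ≤ ps[j]
    · rw [dif_pos h, if_pos (by rw [hget]; exact h100), pvSweep_spec ps (j + 1) (c + 1), hdrop,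
        List.takeWhile_cons, if_pos (by simpa using h100)]
      simp only [List.length_cons, Prod.mk.injEq]
      constructor
      · push_cast; ring
      · omega
    · rw [dif_pos h, if_neg (by rw [hget]; exact h100), hdrop, List.takeWhile_cons,
        if_neg (by simpa using h100)]
      simp
  · rw [pvSweep, dif_neg h]
    rw [List.drop_eq_nil_of_le (by omega)]
    simp
termination_by ps.length - j

theorem pvTakeWhile_map_congr {α : Type} (l : List α) (f g : α → Int) (p q : Int → Bool)
    (h : ∀ x ∈ l, p (f x) = q (g x)) :
    ((l.map f).takeWhile p).length = ((l.map g).takeWhile q).length := by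
  induction l with
  | nil => simp
  | cons a l ih =>
      have ha := h a (by simp)
      have ihl := ih (fun x hx => h x (by simp [hx]))
      simp only [List.map_cons, List.takeWhile_cons, ha]
      by_cases hq : q (g a)
      · simp [hq, ihl]
      · simp [hq]

theorem pvTakeWhile_getElem_not {α : Type} (l : List α) (p : α → Bool) :
    ∀ k : Nat, k = (l.takeWhile p).length → ∀ h : k < l.length, p (l[k]) = false := by
  induction l with
  | nil =>
      intro k hk h
      simp at h
  | cons a l ih =>
      intro k hk h
      by_cases hp : p a = true
      · rw [List.takeWhile_cons, if_pos hp, List.length_cons] at hk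
        subst hk
        simp only [List.getElem_cons_succ]
        exact ih _ rfl (by simpa using h)
      · rw [List.takeWhile_cons, if_neg hp] at hk
        simp at hk
        subst hk
        simpa using hp

theorem pvDropWhile_eq_drop {α : Type} (l : List α) (p : α → Bool) :
    l.dropWhile p = l.drop (l.takeWhile p).length := by
  induction l with
  | nil => simp
  | cons a l ih =>
      by_cases hp : p a
      · simp [List.dropWhile, List.takeWhile, hp, ih]
      · simp [List.dropWhile, List.takeWhile, hp]

-- main invariant of A's while loop: at day t, with the front task unfinished and enough fuel,
-- the loop appends exactly the grouping of the remaining completion days.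
theorem pvLoopA_eq (L : List (Int × Int)) (rest : List Int)
    (hpos : ∀ x ∈ L, 0 < x.2) :
    ∀ (fuel t idx : Nat) (ans : List Int),
      idx ≤ L.length →
      (∀ h : idx < L.length, (t : Int) < pvDay L[idx]) →
      (∀ j (hj : j < L.length), idx ≤ j → pvDay L[j] ≤ (t : Int) + fuel) →
      pvLoopA (L.map Prod.snd ++ rest) fuel (pvPsAt L t) idx ans
        = ans ++ pvGrp ((L.map pvDay).drop idx) := by
  intro fuel
  induction fuel with
  | zero =>
      intro t idx ans hidx hfront hfuel
      have : idx = L.length := by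
        by_contra hne
        have hlt : idx < L.length := lt_of_le_of_ne hidx hne
        have h1 := hfront hlt
        have h2 := hfuel idx hlt le_rfl
        omega
      subst this
      rw [pvLoopA, List.drop_eq_nil_of_le (by simp)]
      simp [pvGrp]
  | succ fuel ih =>
      intro t idx ans hidx hfront hfuel
      rw [pvLoopA]
      have hlen : (pvPsAt L t).length = L.length := by simp [pvPsAt]
      by_cases hlt : idx < L.length
      · rw [if_pos (by omega)]
        rw [pvStepDay_psAt]
        have hget : (pvPsAt L (t + 1)).getD idx 0
            = L[idx].1 + ((t : Int) + 1) * L[idx].2 := by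
          rw [List.getD_eq_getElem _ 0 (by simp [pvPsAt]; omega)]
          simp [pvPsAt]
        have hiff := pvDay_le_iff L[idx] (hpos _ (List.getElem_mem hlt)) ((t : Int) + 1) (by omega)
        have hfr := hfront hlt
        by_cases hdone : 100 ≤ L[idx].1 + ((t : Int) + 1) * L[idx].2
        · rw [if_pos (by rw [hget]; exact hdone)]
          have hday : pvDay L[idx] = (t : Int) + 1 := le_antisymm (hiff.mpr hdone) (by omega)
          -- sweep result
          rw [pvSweep_spec]
          set k := (((pvPsAt L (t + 1)).drop (idx + 1)).takeWhile (fun x => decide (100 ≤ x))).length with hk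
          -- the same length on the days side
          have hdropmap1 : (pvPsAt L (t + 1)).drop (idx + 1)
              = (L.drop (idx + 1)).map (fun x => x.1 + ((t + 1 : Nat) : Int) * x.2) := by
            simp [pvPsAt, List.map_drop]
          have hdropmap2 : (L.map pvDay).drop (idx + 1) = (L.drop (idx + 1)).map pvDay := by
            simp [List.map_drop]
          have hkk : k = (((L.map pvDay).drop (idx + 1)).takeWhile
              (fun x => decide (x ≤ (t : Int) + 1))).length := by
            rw [hk, hdropmap1, hdropmap2]
            apply pvTakeWhile_map_congr
            intro x hx
            have hxL : x ∈ L := List.mem_of_mem_drop hx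
            have hiff2 := pvDay_le_iff x (hpos x hxL) ((t : Int) + 1) (by omega)
            have hcast : ((t + 1 : Nat) : Int) = (t : Int) + 1 := by push_cast; ring
            rw [hcast]
            simp only [decide_eq_decide]
            exact hiff2.symm
          -- unfold pvGrp on the days list
          have hdays : (L.map pvDay).drop idx
              = ((t : Int) + 1) :: (L.map pvDay).drop (idx + 1) := by
            rw [List.drop_eq_getElem_cons (by simpa using hlt)]
            simp [hday]
          rw [hdays, pvGrp]
          have hkle : k ≤ L.length - (idx + 1) := by
            have h1 : k ≤ ((pvPsAt L (t + 1)).drop (idx + 1)).length := by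
              rw [hk]
              exact (List.takeWhile_sublist _).length_le
            simp [pvPsAt] at h1
            omega
          have hdropw : ((L.map pvDay).drop (idx + 1)).dropWhile (fun x => decide (x ≤ (t : Int) + 1))
              = (L.map pvDay).drop (idx + 1 + k) := by
            rw [pvDropWhile_eq_drop, ← hkk, List.drop_drop]
          rw [ih (t + 1) (idx + 1 + k) (ans ++ [1 + (k : Int)]) (by omega) ?_ ?_]
          · rw [hdropw, ← hkk]
            simp
          · -- new front (if any) is unfinished at day t+1
            intro hlt'
            have hklen : k < ((L.map pvDay).drop (idx + 1)).length := by
              simp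
              omega
            have hnot := pvTakeWhile_getElem_not ((L.map pvDay).drop (idx + 1))
              (fun x => decide (x ≤ (t : Int) + 1)) k hkk hklen
            have hel : ((L.map pvDay).drop (idx + 1))[k]'hklen = pvDay (L[idx + 1 + k]'hlt') := by
              rw [List.getElem_drop]
              simp
            rw [hel] at hnot
            simp at hnot
            push_cast
            omega
          · intro j hj hja
            have := hfuel j hj (by omega)
            push_cast at this ⊢
            omega
        · rw [if_neg (by rw [hget]; exact hdone)]
          rw [ih (t + 1) idx ans hidx ?_ ?_]
          · intro h
            have : ¬ pvDay L[idx] ≤ (t : Int) + 1 := fun hcon => hdone (hiff.mp hcon)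
            push_cast
            omega
          · intro j hj hja
            have := hfuel j hj hja
            push_cast at this ⊢
            omega
      · rw [if_neg (by omega)]
        rw [List.drop_eq_nil_of_le (by simp; omega)]
        simp [pvGrp]

-- B's fold computes the grouping
theorem pvFoldB_inv (rest : List Int) :
    ∀ (ans : List Int) (cnt front : Int), 0 < cnt →
      pvFinish (rest.foldl pvStepB (ans, cnt, front))
        = ans ++ (cnt + ((rest.takeWhile (fun x => decide (x ≤ front))).length : Int))
            :: pvGrp (rest.dropWhile (fun x => decide (x ≤ front))) := by
  induction rest with
  | nil =>
      intro ans cnt front hc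
      simp [pvFinish, pvGrp, ne_of_gt hc]
  | cons d rest ih =>
      intro ans cnt front hc
      by_cases hd : d ≤ front
      · have hstep : pvStepB (ans, cnt, front) d = (ans, cnt + 1, front) := by
          simp [pvStepB, ne_of_gt hc, hd]
        rw [List.foldl_cons, hstep, ih ans (cnt + 1) front (by omega)]
        simp [List.takeWhile, List.dropWhile, hd]
        ring
      · have hstep : pvStepB (ans, cnt, front) d = (ans ++ [cnt], 1, d) := by
          simp [pvStepB, hd, ne_of_gt hc]
        rw [List.foldl_cons, hstep, ih (ans ++ [cnt]) 1 d one_pos]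
        simp [List.takeWhile, List.dropWhile, hd, pvGrp]

theorem pvAlt_eq_grp (ps ss : List Int) :
    solution_alt ps ss = pvGrp ((ps.zip ss).map pvDay) := by
  unfold solution_alt
  cases h : (ps.zip ss).map pvDay with
  | nil => simp [pvFinish, pvGrp]
  | cons d days =>
      have hstep : pvStepB ([], 0, 0) d = ([], 1, d) := by simp [pvStepB]
      rw [List.foldl_cons, hstep, pvFoldB_inv days [] 1 d one_pos]
      simp [pvGrp]

-- ===== VERDICT (by name: the statement is the Claim_ definition above) =====
theorem solution_spec : Claim_equal_solution := by
  intro ps ss _ hpre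
  obtain ⟨hlen, hpos⟩ := hpre
  unfold Spec_solution
  set L := ps.zip ss with hL
  have hLlen : L.length = ps.length := by simp [hL]; omega
  have hss : L.map Prod.snd ++ ss.drop ps.length = ss := pvMapSndZipAppend ps ss hlen
  have hps0 : pvPsAt L 0 = ps := by
    unfold pvPsAt
    have h0 : L.map (fun x => x.1 + ((0 : Nat) : Int) * x.2) = L.map Prod.fst := by
      apply List.map_congr_left; intro x _; simp
    rw [h0, hL, List.map_fst_zip hlen]
  have hfront0 : ∀ h : 0 < L.length, ((0 : Nat) : Int) < pvDay L[0] := by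
    intro h
    simpa using pvDay_pos L[0]
  have hfuel0 : ∀ j (hj : j < L.length), 0 ≤ j →
      pvDay L[j] ≤ ((0 : Nat) : Int) + (pvFuel ps : Int) := by
    intro j hj _
    have hj' : j < ps.length := by omega
    have hb := pvDay_bound L[j] (hpos _ (List.getElem_mem hj))
    have hfst : L[j].1 = ps[j] := by
      simp [hL, List.getElem_zip]
    have hmem : (100 - ps[j]).toNat + 1 ∈ ps.map (fun p => (100 - p).toNat + 1) :=
      List.mem_map_of_mem (List.getElem_mem hj')
    have hsum : (100 - ps[j]).toNat + 1 ≤ (ps.map (fun p => (100 - p).toNat + 1)).sum :=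
      List.single_le_sum (fun _ _ => Nat.zero_le _) _ hmem
    unfold pvFuel
    rw [hfst] at hb
    omega
  have hmain := pvLoopA_eq L (ss.drop ps.length) hpos (pvFuel ps) 0 0 [] (Nat.zero_le _) hfront0 hfuel0
  rw [hss, hps0] at hmain
  rw [solution, hmain, pvAlt_eq_grp, ← hL]
  simp
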